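-- pv_equiv track=rewrite | github.com/sergosev/bimboinformatics_tools | modules/is_nucleic_acid.py | is_nucleic_acid
-- ===== SOURCE A (Python) =====
-- def is_nucleic_acid(seq: str, alphabet: set = set("AaTtUuCcGg")) -> bool:
--     """
--     Checks whether the given sequence is a nucleic acid
--
--     Arguments:
--     - seq: a string of both UPPERCASE and lowercase letters
--     - alphabet: a set of acceptable nucleotides. Default is set("AaTtUuCcGg")
--
--     Returns bool.
--     """
--     seq = set(seq)
--     if any(item in set("Tt") for item in seq) and any(
--         item in set("Uu") for item in seq
--     ):
--         return False
--     else: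
--         return seq <= alphabet
-- ===== SOURCE B (Python) =====
-- def is_nucleic_acid(seq: str, alphabet: set = set("AaTtUuCcGg")) -> bool:
--     has_t = False
--     has_u = False
--     for ch in seq:
--         if ch not in alphabet:
--             return False
--         if ch in "Tt":
--             has_t = True
--         if ch in "Uu":
--             has_u = True
--     return not (has_t and has_u)
-- ===== Notes on version B (the rewrite author's own statement) =====
-- stated objective: simpler
-- what changed: Replaces the set construction, two any-scans over the set and the subset test by one explicit pass over the raw string with an early False on a foreign character and two booleans tracking T and U.
import Mathlib
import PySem

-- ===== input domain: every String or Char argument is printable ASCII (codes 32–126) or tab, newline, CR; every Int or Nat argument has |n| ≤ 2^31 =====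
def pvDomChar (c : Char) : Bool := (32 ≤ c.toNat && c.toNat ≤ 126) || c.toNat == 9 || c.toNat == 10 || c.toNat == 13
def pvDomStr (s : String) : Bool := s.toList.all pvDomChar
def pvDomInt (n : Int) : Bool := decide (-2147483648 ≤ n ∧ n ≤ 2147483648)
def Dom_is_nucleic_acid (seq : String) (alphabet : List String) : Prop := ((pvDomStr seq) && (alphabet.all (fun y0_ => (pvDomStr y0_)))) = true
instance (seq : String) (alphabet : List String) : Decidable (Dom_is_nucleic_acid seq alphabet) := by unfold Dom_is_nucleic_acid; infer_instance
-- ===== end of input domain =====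

-- B replaces A's set construction, two any-scans and subset test by one explicit pass over the
-- raw string with an early False and two booleans tracking T/U (objective: simpler).


-- ===== PORT A =====
-- seq = set(seq): Python iterates the string's characters as 1-char strings
def is_nucleic_acid (seq : String) (alphabet : List String) : Bool :=
  let s : PySem.Set String := PySem.Set.ofList (seq.toList.map (fun c => String.ofList [c]))
  if (s.any (fun item => PySem.Set.contains (PySem.Set.ofList ["T", "t"]) item)) &&
     (s.any (fun item => PySem.Set.contains (PySem.Set.ofList ["U", "u"]) item)) then
    false
  else
    PySem.Set.issubset s alphabet

-- ===== PORT B =====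
-- the explicit for-loop of Source B with its two boolean accumulators and early return
def nucLoop (alphabet : List String) (l : List Char) (has_t has_u : Bool) : Bool :=
  match l with
  | [] => !(has_t && has_u)
  | c :: rest =>
      if String.ofList [c] ∈ alphabet then
        nucLoop alphabet rest (has_t || decide (c ∈ (['T', 't'] : List Char)))
                              (has_u || decide (c ∈ (['U', 'u'] : List Char)))
      else false

def is_nucleic_acid_alt (seq : String) (alphabet : List String) : Bool :=
  nucLoop alphabet seq.toList false false

-- ===== PRECONDITION & SPEC =====
def Spec_is_nucleic_acid (seq : String) (alphabet : List String) (out : Bool) : Prop := out = is_nucleic_acid_alt seq alphabet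
instance (seq : String) (alphabet : List String) (out : Bool) : Decidable (Spec_is_nucleic_acid seq alphabet out) := by unfold Spec_is_nucleic_acid; infer_instance

-- ===== CLAIM (what is proved, stated in full; the proofs are below) =====
def Claim_equal_is_nucleic_acid : Prop := ∀ (seq : String) (alphabet : List String), Dom_is_nucleic_acid seq alphabet → Spec_is_nucleic_acid seq alphabet (is_nucleic_acid seq alphabet)

-- ===== LEMMAS AND PROOFS =====

theorem mk_mem_Tt (c : Char) :
    PySem.Set.contains (PySem.Set.ofList ["T", "t"]) (String.ofList [c]) = decide (c ∈ (['T', 't'] : List Char)) := by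
  simp [PySem.Set.contains, PySem.Set.ofList, PySem.Set.add, String.ext_iff]

theorem mk_mem_Uu (c : Char) :
    PySem.Set.contains (PySem.Set.ofList ["U", "u"]) (String.ofList [c]) = decide (c ∈ (['U', 'u'] : List Char)) := by
  have hU : ("U" : String) = String.ofList ['U'] := rfl
  have hu : ("u" : String) = String.ofList ['u'] := rfl
  simp [PySem.Set.contains, PySem.Set.ofList, PySem.Set.add, hU, hu, String.ext_iff]

-- any over set(seq) equals any over the character list (membership-only predicate)
theorem any_ofList_map {α β : Type} [BEq β] [LawfulBEq β]  (l : List α) (f : α → β) (p : β → Bool) :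
    (PySem.Set.ofList (l.map f)).any p = l.any (fun c => p (f c)) := by
  apply Bool.eq_iff_iff.mpr
  simp only [List.any_eq_true]
  constructor
  · rintro ⟨x, hx, hp⟩
    rw [PySem.Set.mem_ofList] at hx
    obtain ⟨c, hc, rfl⟩ := List.mem_map.mp hx
    exact ⟨c, hc, hp⟩
  · rintro ⟨c, hc, hp⟩
    exact ⟨f c, (PySem.Set.mem_ofList _ _).mpr (List.mem_map.mpr ⟨c, hc, rfl⟩), hp⟩

theorem issubset_ofList_map (l : List Char) (alphabet : List String) :
    PySem.Set.issubset (PySem.Set.ofList (l.map (fun c => String.ofList [c]))) alphabet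
      = l.all (fun c => decide (String.ofList [c] ∈ alphabet)) := by
  apply Bool.eq_iff_iff.mpr
  rw [PySem.Set.issubset_iff]
  simp only [List.all_eq_true, decide_eq_true_eq]
  constructor
  · intro h c hc
    exact h _ ((PySem.Set.mem_ofList _ _).mpr (List.mem_map.mpr ⟨c, hc, rfl⟩))
  · intro h x hx
    obtain ⟨c, hc, rfl⟩ := List.mem_map.mp ((PySem.Set.mem_ofList _ _).mp hx)
    exact h c hc

-- closed form of B's loop
theorem nucLoop_eq (alphabet : List String) :
    ∀ (l : List Char) (t u : Bool),
      nucLoop alphabet l t u =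
        if l.all (fun c => decide (String.ofList [c] ∈ alphabet)) then
          !((t || l.any (fun c => decide (c ∈ (['T', 't'] : List Char)))) &&
            (u || l.any (fun c => decide (c ∈ (['U', 'u'] : List Char)))))
        else false := by
  intro l
  induction l with
  | nil => intro t u; simp [nucLoop]
  | cons c rest ih =>
      intro t u
      by_cases h : String.ofList [c] ∈ alphabet
      · simp [nucLoop, h, ih, Bool.or_assoc]
      · simp [nucLoop, h]

theorem is_nucleic_acid_spec' (seq : String) (alphabet : List String) :
    is_nucleic_acid seq alphabet = is_nucleic_acid_alt seq alphabet := by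
  unfold is_nucleic_acid is_nucleic_acid_alt
  rw [nucLoop_eq]
  simp only [any_ofList_map, issubset_ofList_map, mk_mem_Tt, mk_mem_Uu, Bool.false_or]
  cases hA : seq.toList.all (fun c => decide (String.ofList [c] ∈ alphabet)) <;>
  cases hT : seq.toList.any (fun c => decide (c ∈ (['T', 't'] : List Char))) <;>
  cases hU : seq.toList.any (fun c => decide (c ∈ (['U', 'u'] : List Char))) <;>
  simp

-- ===== VERDICT (by name: the statement is the Claim_ definition above) =====
theorem is_nucleic_acid_spec : Claim_equal_is_nucleic_acid := by
  intro seq alphabet _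
  exact is_nucleic_acid_spec' seq alphabet
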